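-- pv_equiv track=rewrite | github.com/FeatherRed/OS-PageSwapSim | Algorithms.py | simple_clock
-- ===== SOURCE A (Python) =====
-- def simple_clock(pages, frame_size):
--     # clock
--     frame = [-1] * frame_size
--     use_bit = [0] * frame_size
--     page_faults = 0
--     pointer = 0
--
--     for page in pages:
--         if page not in frame:
--             while use_bit[pointer] == 1:
--                 use_bit[pointer] = 0
--                 pointer = (pointer + 1) % frame_size
--
--             frame[pointer] = page
--             use_bit[pointer] = 1
--             pointer = (pointer + 1) % frame_size
--             page_faults += 1
--         else:
--             use_bit[frame.index(page)] = 1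
--
--     return page_faults
-- ===== SOURCE B (Python) =====
-- def simple_clock(pages, frame_size):
--     # Second-chance (FIFO with reference bit): a queue of [page, use_bit]
--     # entries rotated on eviction, instead of a fixed array with a clock hand.
--     queue = [[-1, 0] for _ in range(frame_size)]
--     page_faults = 0
--     for page in pages:
--         hit = next((e for e in queue if e[0] == page), None)
--         if hit is not None:
--             hit[1] = 1
--         else:
--             while queue[0][1] == 1:
--                 e = queue.pop(0)
--                 e[1] = 0
--                 queue.append(e)
--             queue.pop(0)
--             queue.append([page, 1])
--             page_faults += 1
--     return page_faults
-- ===== Notes on version B (the rewrite author's own statement) =====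
-- stated objective: alternative
-- what changed: Replaces the fixed frame/use-bit arrays scanned by a modular clock hand with a second-chance FIFO queue of (page, use-bit) entries that is rotated on eviction, with a first-match hit update.
-- outside the precondition, e.g. on simple_clock([-1, -2, -1, 1, -1, 2, -1], 3): A returns 4, B returns 3; on simple_clock([1], 0): A raises IndexError, B raises IndexError
import Mathlib
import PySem

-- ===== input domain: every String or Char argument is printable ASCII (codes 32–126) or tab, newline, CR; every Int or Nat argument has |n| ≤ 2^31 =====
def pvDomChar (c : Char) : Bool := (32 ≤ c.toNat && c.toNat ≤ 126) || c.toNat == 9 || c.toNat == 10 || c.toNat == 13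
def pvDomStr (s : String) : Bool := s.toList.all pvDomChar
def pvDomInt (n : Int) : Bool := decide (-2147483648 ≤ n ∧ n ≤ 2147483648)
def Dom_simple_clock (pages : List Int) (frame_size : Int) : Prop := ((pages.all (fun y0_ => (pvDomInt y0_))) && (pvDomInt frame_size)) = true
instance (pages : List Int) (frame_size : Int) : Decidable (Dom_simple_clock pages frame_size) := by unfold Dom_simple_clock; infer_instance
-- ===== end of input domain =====

-- B replaces A's fixed frame/use-bit arrays with a modular clock hand by a
-- second-chance FIFO queue of (page, use-bit) entries rotated on eviction
-- (objective: alternative formulation of the same policy, same cost).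

-- ===== PORT A =====
-- the inner `while use_bit[pointer] == 1` loop; fuel use.length+1 is always
-- sufficient on Pre_ inputs (each iteration clears one set bit)
def pvClockWhile (fuel : Nat) (use : List Int) (ptr n : Int) : List Int × Int :=
  match fuel with
  | 0 => (use, ptr)
  | fuel + 1 =>
    if (PySem.List.pyGet? use ptr).getD 0 = 1 then
      -- ptr is a valid nonnegative index on Pre_ inputs, so .toNat is exact here
      pvClockWhile fuel (use.set ptr.toNat 0) (PySem.Int.mod (ptr + 1) n) n
    else (use, ptr)

def pvClockStep (n : Int) (st : List Int × List Int × Int × Int) (page : Int) :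
    List Int × List Int × Int × Int :=
  let frame := st.1; let use := st.2.1; let ptr := st.2.2.1; let faults := st.2.2.2
  if page ∉ frame then
    let w := pvClockWhile (use.length + 1) use ptr n
    (frame.set w.2.toNat page, w.1.set w.2.toNat 1, PySem.Int.mod (w.2 + 1) n, faults + 1)
  else
    (frame, use.set ((PySem.List.index? frame page).getD 0) 1, ptr, faults)

def simple_clock (pages : List Int) (frame_size : Int) : Int :=
  (pages.foldl (pvClockStep frame_size)
    (List.replicate frame_size.toNat (-1), List.replicate frame_size.toNat 0, 0, 0)).2.2.2

-- ===== PORT B =====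
-- set the use bit of the first queue entry holding `page` (the in-place
-- mutation of the entry found by `next(...)` in Source B)
-- tail-recursive scan: entries already passed are kept (reversed) in acc
def pvSetRefGo (page : Int) (acc : List (Int × Int)) : List (Int × Int) → List (Int × Int)
  | [] => acc.reverse
  | e :: rest =>
    if e.1 = page then acc.reverse ++ (e.1, 1) :: rest
    else pvSetRefGo page (e :: acc) rest

def pvSetRef (page : Int) (q : List (Int × Int)) : List (Int × Int) :=
  pvSetRefGo page [] q

-- `while queue[0][1] == 1: rotate front to back with its bit cleared`
def pvRotWhile (fuel : Nat) (q : List (Int × Int)) : List (Int × Int) :=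
  match fuel with
  | 0 => q
  | fuel + 1 =>
    match q with
    | [] => []
    | e :: rest => if e.2 = 1 then pvRotWhile fuel (rest ++ [(e.1, 0)]) else e :: rest

def pvAltStep (st : List (Int × Int) × Int) (page : Int) : List (Int × Int) × Int :=
  if (st.1.find? (fun e => e.1 == page)).isSome then
    (pvSetRef page st.1, st.2)
  else
    let q := pvRotWhile (st.1.length + 1) st.1
    (q.tail ++ [(page, 1)], st.2 + 1)

def simple_clock_alt (pages : List Int) (frame_size : Int) : Int :=
  (pages.foldl pvAltStep (List.replicate frame_size.toNat ((-1 : Int), (0 : Int)), 0)).2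

-- ===== PRECONDITION & SPEC =====
-- Pre_ excludes page streams containing -1, which collides with A's empty-slot
-- sentinel (a request for page -1 counts as a hit on an empty frame), a
-- defensible-corner artefact on which A's and B's counts legitimately differ;
-- and nonpositive frame sizes with a nonempty stream, on which both A and B
-- raise IndexError.
def Pre_simple_clock (pages : List Int) (frame_size : Int) : Prop :=
  (-1 : Int) ∉ pages ∧ (1 ≤ frame_size ∨ pages = [])
instance (pages : List Int) (frame_size : Int) : Decidable (Pre_simple_clock pages frame_size) := by
  unfold Pre_simple_clock; infer_instance

def pvWitness_simple_clock : List Int × Int := ([1, 2, 3, 1, 4, 2, 3], 2)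

def Spec_simple_clock (pages : List Int) (frame_size : Int) (out : Int) : Prop := out = simple_clock_alt pages frame_size
instance (pages : List Int) (frame_size : Int) (out : Int) : Decidable (Spec_simple_clock pages frame_size out) := by unfold Spec_simple_clock; infer_instance

-- ===== CLAIM (what is proved, stated in full; the proofs are below) =====
def Claim_equal_simple_clock : Prop := ∀ (pages : List Int) (frame_size : Int), Dom_simple_clock pages frame_size → Pre_simple_clock pages frame_size → Spec_simple_clock pages frame_size (simple_clock pages frame_size)

-- ===== LEMMAS AND PROOFS =====

-- the queue of B is the frame/use-bit table of A read from the clock hand on: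
def pvRot (l : List (Int × Int)) (k : Nat) : List (Int × Int) := l.drop k ++ l.take k

lemma pvRot_zero (l : List (Int × Int)) : pvRot l 0 = l := by simp [pvRot]

lemma pvRot_cons (l : List (Int × Int)) (k : Nat) (h : k < l.length) :
    pvRot l k = l[k] :: (l.drop (k + 1) ++ l.take k) := by
  rw [pvRot, List.drop_eq_getElem_cons h]; rfl

-- rotating the (cleared/evicted) front entry to the back = writing at the hand
-- and advancing it
lemma pvRot_step (l : List (Int × Int)) (k : Nat) (a : Int × Int) (h : k < l.length) :
    (pvRot l k).tail ++ [a] = pvRot (l.set k a) ((k + 1) % l.length) := by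
  have hset : l.set k a = l.take k ++ a :: l.drop (k + 1) := by
    rw [List.set_eq_take_append_cons_drop, if_pos h]
  have htail : (pvRot l k).tail = l.drop (k + 1) ++ l.take k := by
    rw [pvRot_cons l k h, List.tail_cons]
  have hlt : (l.take k).length = k := by simp; omega
  rcases Nat.lt_or_ge (k + 1) l.length with h1 | h1
  · have hd : (l.take k ++ a :: l.drop (k + 1)).drop (k + 1) = l.drop (k + 1) := by
      rw [show k + 1 = (l.take k).length + 1 from by omega]
      simp [List.drop_append]
    have ht : (l.take k ++ a :: l.drop (k + 1)).take (k + 1) = l.take k ++ [a] := by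
      rw [show k + 1 = (l.take k).length + 1 from by omega]
      simp [List.take_append]
    rw [Nat.mod_eq_of_lt h1, htail, pvRot, hset, hd, ht, List.append_assoc]
  · have hk1 : k + 1 = l.length := by omega
    rw [hk1, Nat.mod_self, pvRot_zero, htail, hset, hk1, List.drop_length]
    simp

lemma zip_set (l1 : List Int) (l2 : List Int) (i : Nat) (a b : Int) :
    (l1.set i a).zip (l2.set i b) = (l1.zip l2).set i (a, b) := by
  induction l1 generalizing l2 i with
  | nil => simp
  | cons a1 t1 ih =>
    cases l2 with
    | nil => simp
    | cons a2 t2 =>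
      cases i with
      | zero => simp
      | succ i => simp [ih]

lemma map_ref_id (page : Int) (l : List (Int × Int)) (h : ∀ e ∈ l, e.1 ≠ page) :
    l.map (fun e => if e.1 = page then (e.1, 1) else e) = l := by
  induction l with
  | nil => rfl
  | cons e rest ih =>
    have h1 := h e (by simp)
    simp only [List.map_cons, if_neg h1, ih (fun x hx => h x (by simp [hx]))]

lemma setRefGo_eq_map (page : Int) (l : List (Int × Int)) :
    ∀ acc, l.countP (fun e => e.1 == page) ≤ 1 →
    pvSetRefGo page acc l = acc.reverse ++ l.map (fun e => if e.1 = page then (e.1, 1) else e) := by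
  induction l with
  | nil => intro acc _; simp [pvSetRefGo]
  | cons e rest ih =>
    intro acc h
    by_cases he : e.1 = page
    · have h0 : rest.countP (fun e => e.1 == page) = 0 := by
        rw [List.countP_cons] at h
        simp only [he, beq_self_eq_true, if_pos] at h
        omega
      have hrest : ∀ x ∈ rest, x.1 ≠ page := by
        intro x hx hxp
        have := List.countP_eq_zero.mp h0 x hx
        simp [hxp] at this
      simp [pvSetRefGo, he, map_ref_id page rest hrest]
    · have h' : rest.countP (fun e => e.1 == page) ≤ 1 := by
        rw [List.countP_cons] at h
        simp [he] at h
        omega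
      simp [pvSetRefGo, he, ih (e :: acc) h']

lemma setRef_eq_map (page : Int) (l : List (Int × Int))
    (h : l.countP (fun e => e.1 == page) ≤ 1) :
    pvSetRef page l = l.map (fun e => if e.1 = page then (e.1, 1) else e) := by
  rw [pvSetRef, setRefGo_eq_map page l [] h]
  rfl

lemma countP_zip_fst (frame use : List Int) (page : Int) (h : frame.length = use.length) :
    (frame.zip use).countP (fun e => e.1 == page) = frame.countP (fun x => x == page) := by
  induction frame generalizing use with
  | nil => simp
  | cons a t ih =>
    cases use with
    | nil => simp at h
    | cons b u =>
      simp only [List.zip_cons_cons, List.countP_cons]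
      rw [ih u (by simpa using h)]

lemma pvRot_map (f : Int × Int → Int × Int) (l : List (Int × Int)) (k : Nat) :
    (pvRot l k).map f = pvRot (l.map f) k := by
  simp [pvRot, List.map_drop, List.map_take]

lemma countP_rot (l : List (Int × Int)) (k : Nat) (p : Int × Int → Bool) :
    (pvRot l k).countP p = l.countP p := by
  rw [pvRot, List.countP_append, Nat.add_comm, ← List.countP_append,
    List.take_append_drop]

lemma mem_fst_zip_iff (frame use : List Int) (page : Int) (h : frame.length = use.length) :
    (∃ e ∈ frame.zip use, e.1 = page) ↔ page ∈ frame := by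
  constructor
  · rintro ⟨e, he, hpe⟩
    have := List.of_mem_zip he
    rw [← hpe]; exact this.1
  · intro hmem
    obtain ⟨i, hi, hei⟩ := List.mem_iff_getElem.mp hmem
    refine ⟨(frame.zip use)[i]'(by simp [List.length_zip, h]; omega), List.getElem_mem _, ?_⟩
    simp [List.getElem_zip, hei]

-- the hit branch: A's use_bit[frame.index(page)] = 1 seen as a map over the table
lemma hit_zip (frame use : List Int) (page : Int)
    (hlen : frame.length = use.length) (hmem : page ∈ frame)
    (huniq : frame.countP (fun x => x == page) ≤ 1) :
    frame.zip (use.set ((PySem.List.index? frame page).getD 0) 1)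
      = (frame.zip use).map (fun e => if e.1 = page then (e.1, 1) else e) := by
  induction frame generalizing use with
  | nil => simp at hmem
  | cons a t ih =>
    cases use with
    | nil => simp at hlen
    | cons b u =>
      by_cases ha : a = page
      · subst ha
        rw [PySem.List.index?_cons_self]
        have h0 : t.countP (fun x => x == a) = 0 := by
          rw [List.countP_cons] at huniq
          simp only [beq_self_eq_true, if_true] at huniq
          omega
        have hnot : ∀ e ∈ t.zip u, e.1 ≠ a := by
          intro e he hea
          have hm := (List.of_mem_zip he).1
          have := List.countP_eq_zero.mp h0 e.1 hm
          simp [hea] at this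
        simp [map_ref_id a (t.zip u) hnot]
      · have hmem' : page ∈ t := by
          rcases List.mem_cons.mp hmem with h' | h'
          · exact absurd h'.symm ha
          · exact h'
        obtain ⟨j, hj⟩ := Option.isSome_iff_exists.mp
          ((PySem.List.index?_isSome_iff t page).mpr hmem')
        rw [PySem.List.index?_cons_of_ne t ha, hj]
        have huniq' : t.countP (fun x => x == page) ≤ 1 := by
          rw [List.countP_cons] at huniq; simp [ha] at huniq; omega
        have := ih u (by simpa using hlen) hmem' huniq'
        rw [hj] at this
        simp only [Option.map_some, Option.getD_some] at this ⊢
        simp only [List.set_cons_succ, List.zip_cons_cons, this, List.map_cons, if_neg ha]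

-- the two inner while loops correspond, for any common fuel
lemma while_rel (fuel : Nat) (frame use : List Int) (k : Nat) (n : Int)
    (hlen : frame.length = use.length) (hk : k < use.length)
    (hn : n = (use.length : Int)) :
    ∃ (use' : List Int) (k' : Nat),
      pvClockWhile fuel use (k : Int) n = (use', (k' : Int)) ∧
      use'.length = use.length ∧ k' < use.length ∧
      pvRotWhile fuel (pvRot (frame.zip use) k) = pvRot (frame.zip use') k' := by
  induction fuel generalizing use k with
  | zero => exact ⟨use, k, rfl, rfl, hk, rfl⟩
  | succ fuel ih =>
    have hkf : k < frame.length := by omega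
    have hkz : k < (frame.zip use).length := by simp [List.length_zip]; omega
    have hzlen : (frame.zip use).length = use.length := by simp [List.length_zip]; omega
    have hcons : pvRot (frame.zip use) k
        = (frame.zip use)[k] :: ((frame.zip use).drop (k + 1) ++ (frame.zip use).take k) :=
      pvRot_cons _ _ hkz
    have hget : (frame.zip use)[k]'hkz = (frame[k]'hkf, use[k]'hk) := List.getElem_zip
    have hpy : (PySem.List.pyGet? use (k : Int)).getD 0 = use[k] := by
      rw [PySem.List.pyGet?_natCast]
      simp [List.getElem?_eq_getElem hk]
    by_cases hbit : use[k] = 1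
    · -- loop body runs: clear the bit at the hand / rotate the cleared front back
      have hpos : 0 < use.length := by omega
      have hmod : PySem.Int.mod ((k : Int) + 1) n = (((k + 1) % use.length : Nat) : Int) := by
        rw [PySem.Int.mod_eq_emod_of_pos (by omega), hn]
        push_cast
        rfl
      obtain ⟨use', k', ha', hl', hk'', hb'⟩ :=
        ih (use.set k 0) ((k + 1) % use.length)
          (by simp [hlen]) (by simpa using Nat.mod_lt _ hpos) (by simp [hn])
      refine ⟨use', k', ?_, by simpa using hl', by simpa using hk'', ?_⟩
      · simp only [pvClockWhile]
        rw [hpy, if_pos hbit, Int.toNat_natCast, hmod]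
        exact ha'
      · rw [hcons]
        simp only [pvRotWhile, hget]
        rw [if_pos hbit]
        have hstep : ((frame.zip use).drop (k + 1) ++ (frame.zip use).take k)
            ++ [((frame[k]'hkf), (0 : Int))]
            = pvRot ((frame.zip use).set k ((frame[k]'hkf), (0 : Int)))
                ((k + 1) % (frame.zip use).length) := by
          have hps := pvRot_step (frame.zip use) k ((frame[k]'hkf), (0 : Int)) hkz
          rw [hcons] at hps
          simpa using hps
        have hzs : (frame.zip use).set k ((frame[k]'hkf), (0 : Int))
            = frame.zip (use.set k 0) := by
          rw [← zip_set frame use k (frame[k]'hkf) 0, List.set_getElem_self]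
        rw [hstep, hzs, hzlen]
        exact hb'
    · refine ⟨use, k, ?_, rfl, hk, ?_⟩
      · simp only [pvClockWhile]
        rw [hpy, if_neg hbit]
      · rw [hcons]
        simp only [pvRotWhile, hget]
        rw [if_neg hbit, ← hget, ← hcons]

lemma countP_set_le (frame : List Int) (k : Nat) (page p : Int) (hk : k < frame.length)
    (hne : p ≠ page) :
    (frame.set k page).countP (fun x => x == p) ≤ frame.countP (fun x => x == p) := by
  have hdec : frame.set k page = frame.take k ++ page :: frame.drop (k + 1) := by
    rw [List.set_eq_take_append_cons_drop, if_pos hk]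
  have hfr : frame = frame.take k ++ frame[k] :: frame.drop (k + 1) := by
    conv_lhs => rw [← List.take_append_drop k frame, List.drop_eq_getElem_cons hk]
  rw [hdec]
  conv_rhs => rw [hfr]
  simp only [List.countP_append, List.countP_cons]
  have hfalse : (page == p) = false := by
    simp only [beq_eq_false_iff_ne, ne_eq]
    exact fun h => hne h.symm
  simp [hfalse]

lemma countP_set_self (frame : List Int) (k : Nat) (page : Int) (hk : k < frame.length)
    (h0 : frame.countP (fun x => x == page) = 0) :
    (frame.set k page).countP (fun x => x == page) = 1 := by
  have hdec : frame.set k page = frame.take k ++ page :: frame.drop (k + 1) := by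
    rw [List.set_eq_take_append_cons_drop, if_pos hk]
  have h1 : (frame.take k).countP (fun x => x == page) = 0 :=
    Nat.le_zero.mp (h0 ▸ (List.take_sublist k frame).countP_le)
  have h2 : (frame.drop (k + 1)).countP (fun x => x == page) = 0 :=
    Nat.le_zero.mp (h0 ▸ (List.drop_sublist (k + 1) frame).countP_le)
  rw [hdec, List.countP_append, List.countP_cons, h1, h2]
  simp

-- the main simulation: A's fold state and B's fold state stay related
lemma fold_rel (pages : List Int) (frame use : List Int) (k : Nat) (f : Int) (n : Int)
    (hp : (-1 : Int) ∉ pages)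
    (hlen : frame.length = use.length) (hk : k < use.length)
    (hn : n = (use.length : Int))
    (huniq : ∀ p : Int, p ≠ -1 → frame.countP (fun x => x == p) ≤ 1) :
    (pages.foldl (pvClockStep n) (frame, use, (k : Int), f)).2.2.2
      = (pages.foldl pvAltStep (pvRot (frame.zip use) k, f)).2 := by
  induction pages generalizing frame use k f with
  | nil => rfl
  | cons page rest ihp =>
    have hpage : page ≠ (-1 : Int) := by
      intro h; exact hp (h ▸ List.mem_cons_self)
    have hrest : (-1 : Int) ∉ rest := fun h => hp (List.mem_cons_of_mem _ h)
    have hzlen : (frame.zip use).length = use.length := by simp [List.length_zip]; omega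
    have hmemq : ∀ e, e ∈ pvRot (frame.zip use) k ↔ e ∈ frame.zip use := by
      intro e
      rw [pvRot, List.mem_append, or_comm, ← List.mem_append, List.take_append_drop]
    simp only [List.foldl_cons]
    by_cases hm : page ∈ frame
    · -- hit: first-match update in the queue = use_bit[frame.index(page)] = 1
      have hfind : ((pvRot (frame.zip use) k).find? (fun e => e.1 == page)).isSome = true := by
        rw [List.find?_isSome]
        obtain ⟨e, he, hpe⟩ := (mem_fst_zip_iff frame use page hlen).mpr hm
        exact ⟨e, (hmemq e).mpr he, by simp [hpe]⟩
      have hstepA : pvClockStep n (frame, use, (k : Int), f) page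
          = (frame, use.set ((PySem.List.index? frame page).getD 0) 1, (k : Int), f) := by
        simp [pvClockStep, hm]
      have hstepB : pvAltStep (pvRot (frame.zip use) k, f) page
          = (pvSetRef page (pvRot (frame.zip use) k), f) := by
        simp [pvAltStep, hfind]
      rw [hstepA, hstepB]
      have hcnt : (pvRot (frame.zip use) k).countP (fun e => e.1 == page) ≤ 1 := by
        rw [countP_rot, countP_zip_fst frame use page hlen]
        exact huniq page hpage
      rw [setRef_eq_map page _ hcnt, pvRot_map,
          ← hit_zip frame use page hlen hm (huniq page hpage)]
      exact ihp frame (use.set _ 1) k f hrest (by simpa using hlen)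
        (by simpa using hk) (by simpa using hn) huniq
    · -- fault: rotate-evict-append = clock sweep, write, advance
      obtain ⟨use', k', ha', hl', hk', hb'⟩ := while_rel (use.length + 1) frame use k n hlen hk hn
      have hfind : ((pvRot (frame.zip use) k).find? (fun e => e.1 == page)).isSome = false := by
        rw [Bool.eq_false_iff, ne_eq, List.find?_isSome]
        rintro ⟨e, he, hpe⟩
        exact hm ((mem_fst_zip_iff frame use page hlen).mp
          ⟨e, (hmemq e).mp he, by simpa using hpe⟩)
      have hmod : PySem.Int.mod ((k' : Int) + 1) n = (((k' + 1) % use.length : Nat) : Int) := by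
        rw [PySem.Int.mod_eq_emod_of_pos (by omega), hn]
        push_cast
        rfl
      have hstepA : pvClockStep n (frame, use, (k : Int), f) page
          = (frame.set k' page, use'.set k' 1, (((k' + 1) % use.length : Nat) : Int), f + 1) := by
        simp only [pvClockStep, if_pos hm, ha', Int.toNat_natCast, hmod]
      have hqlen : (pvRot (frame.zip use) k).length = use.length := by
        simp [pvRot]; omega
      have hstepB : pvAltStep (pvRot (frame.zip use) k, f) page
          = ((pvRot (frame.zip use') k').tail ++ [(page, 1)], f + 1) := by
        simp [pvAltStep, hfind, hqlen, hb']
      rw [hstepA, hstepB]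
      have hz'len : k' < (frame.zip use').length := by
        simp [List.length_zip, hl']; omega
      have hq' : (pvRot (frame.zip use') k').tail ++ [(page, 1)]
          = pvRot ((frame.set k' page).zip (use'.set k' 1)) ((k' + 1) % use.length) := by
        rw [pvRot_step (frame.zip use') k' (page, 1) hz'len,
            zip_set frame use' k' page 1]
        congr 1
        simp [List.length_zip, hl', hlen]
      rw [hq']
      have hcnt0 : frame.countP (fun x => x == page) = 0 := by
        rw [List.countP_eq_zero]
        intro a ha hpa
        have haa : a = page := by simpa using hpa
        exact hm (haa ▸ ha)
      refine ihp (frame.set k' page) (use'.set k' 1) ((k' + 1) % use.length) (f + 1) hrest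
        (by simp [hlen, hl'])
        (by rw [List.length_set, hl']; exact Nat.mod_lt _ (by omega))
        (by rw [List.length_set, hl']; exact hn) ?_
      intro p hpne
      by_cases hpp : p = page
      · rw [hpp, countP_set_self frame k' page (by omega) hcnt0]
      · calc (frame.set k' page).countP (fun x => x == p)
            ≤ frame.countP (fun x => x == p) :=
              countP_set_le frame k' page p (by omega) hpp
          _ ≤ 1 := huniq p hpne

-- ===== VERDICT (by name: the statement is the Claim_ definition above) =====
theorem simple_clock_spec : Claim_equal_simple_clock := by
  intro pages frame_size _ hpre
  obtain ⟨hneg, hfs⟩ := hpre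
  unfold Spec_simple_clock
  rcases hfs with hfs | hnil
  · unfold simple_clock simple_clock_alt
    have h := fold_rel pages (List.replicate frame_size.toNat (-1))
      (List.replicate frame_size.toNat 0) 0 0 frame_size hneg
      (by simp) (by simp; omega) (by simp; omega)
      (by
        intro p hp
        rw [List.countP_eq_zero.mpr]
        · omega
        · intro a ha hpa
          have h1 : a = -1 := (List.mem_replicate.mp ha).2
          have h2 : a = p := by simpa using hpa
          exact hp (h2 ▸ h1))
    rw [show ((0 : Nat) : Int) = (0 : Int) from rfl] at h
    rw [h, pvRot_zero, List.zip_replicate, Nat.min_self]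
  · subst hnil
    rfl
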